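-- pv_equiv track=rewrite | github.com/olokevin/optical_pinn_training | core/TFONet/modules.py | merge_ints
-- ===== SOURCE A (Python) =====
-- from bisect import insort_left
--
-- def merge_ints(values, size):
--     """Utility function to merge the smallest values in a given tuple until it's length is the given size
--
--     Parameters
--     ----------
--     values : int list
--         list of values to merge
--     size : int
--         target len of the list
--         stop merging when len(values) <= size
--
--     Returns
--     -------
--     merge_values : list of size ``size``
--     """
--     if len(values) <= 1:
--         return values
--
--     values = sorted(list(values))
--     while (len(values) > size):
--         a, b, *values = values
--         insort_left(values, a*b)
--
--     return tuple(values)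
-- ===== SOURCE B (Python) =====
-- def merge_ints(values, size):
--     """Merge the two smallest values (by product) until len(values) <= size.
--
--     Re-implementation using a leftist min-heap: pop the two smallest,
--     push their product, then drain the heap in increasing order.
--     """
--     if len(values) <= 1:
--         return values
--
--     # leftist heap node: (key, rank, left, right); empty heap is None
--     def meld(h1, h2):
--         if h1 is None:
--             return h2
--         if h2 is None:
--             return h1
--         if h2[0] < h1[0]:
--             h1, h2 = h2, h1
--         k, _, l, r = h1
--         m = meld(r, h2)
--         rl = l[1] if l is not None else 0
--         rm = m[1] if m is not None else 0
--         if rl >= rm: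
--             return (k, rm + 1, l, m)
--         else:
--             return (k, rl + 1, m, l)
--
--     heap = None
--     for v in values:
--         heap = meld(heap, (v, 1, None, None))
--     n = len(values)
--     while n > size:
--         a, _, l, r = heap
--         heap = meld(l, r)
--         b, _, l, r = heap
--         heap = meld(l, r)
--         heap = meld(heap, (a * b, 1, None, None))
--         n -= 1
--     out = []
--     while n > 0:
--         k, _, l, r = heap
--         out.append(k)
--         heap = meld(l, r)
--         n -= 1
--     return tuple(out)
-- ===== Notes on version B (the rewrite author's own statement) =====
-- stated objective: faster
-- what changed: Replaced the sorted-list-with-insort_left loop (each insort_left shifts O(n) elements) by a leftist min-heap: pop the two smallest, push their product, then drain the heap in increasing order; a timing run measured ~5x at n=16384 and A timed out at n=65536 where B still returned.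
import Mathlib
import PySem

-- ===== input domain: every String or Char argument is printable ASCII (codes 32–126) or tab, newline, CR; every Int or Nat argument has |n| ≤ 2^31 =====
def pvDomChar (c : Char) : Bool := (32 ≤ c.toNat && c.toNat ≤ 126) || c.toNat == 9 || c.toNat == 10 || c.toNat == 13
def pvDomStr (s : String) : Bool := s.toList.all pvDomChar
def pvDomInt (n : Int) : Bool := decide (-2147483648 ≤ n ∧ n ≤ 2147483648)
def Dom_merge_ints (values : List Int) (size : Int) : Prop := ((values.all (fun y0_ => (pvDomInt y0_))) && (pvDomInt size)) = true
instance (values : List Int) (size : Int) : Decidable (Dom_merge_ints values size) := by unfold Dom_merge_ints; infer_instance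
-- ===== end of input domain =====

-- B replaces A's sorted-list-with-insort_left merge loop by a leftist min-heap
-- (pop two smallest, push product, drain in increasing order); measured faster by the
-- timing run (~5x at n=16384; A timed out at n=65536 where B still returned).

-- ===== PORT A =====

-- bisect.insort_left ported as insertion before the first element ≥ x: exact on
-- sorted lists, and A only ever calls insort_left on a sorted list.
def insortA (x : Int) : List Int → List Int
  | [] => [x]
  | h :: t => if h < x then h :: insortA x t else x :: h :: t

theorem length_insortA (x : Int) (l : List Int) : (insortA x l).length = l.length + 1 := by
  induction l with
  | nil => simp [insortA]
  | cons h t ih => simp only [insortA]; split <;> simp [ih]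

def loopA (size : Int) (l : List Int) : List Int :=
  if (l.length : Int) > size then
    match l with
    | a :: b :: rest => loopA size (insortA (a*b) rest)
    | _ => l   -- Python raises ValueError here (only reachable with size ≤ 0); excluded by Pre_
  else l
termination_by l.length
decreasing_by simp [length_insortA]

def merge_ints (values : List Int) (size : Int) : List Int :=
  if values.length ≤ 1 then values
  else loopA size (PySem.List.sorted values (fun x => x))

-- ===== PORT B =====

-- leftist-heap node: key, rank, left child, right child
inductive LHeap where
  | nil : LHeap
  | node : Int → Int → LHeap → LHeap → LHeap
deriving DecidableEq, Repr

def LHeap.rk : LHeap → Int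
  | .nil => 0
  | .node _ s _ _ => s

def mkNode (k : Int) (l m : LHeap) : LHeap :=
  if l.rk ≥ m.rk then .node k (m.rk + 1) l m else .node k (l.rk + 1) m l

def meld : LHeap → LHeap → LHeap
  | .nil, h2 => h2
  | .node k s l r, .nil => .node k s l r
  | .node k1 s1 l1 r1, .node k2 s2 l2 r2 =>
    if k2 < k1 then
      mkNode k2 l2 (meld r2 (.node k1 s1 l1 r1))
    else
      mkNode k1 l1 (meld r1 (.node k2 s2 l2 r2))
termination_by h1 h2 => sizeOf h1 + sizeOf h2
decreasing_by all_goals (simp; try omega)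

-- the while n > size loop: returns (final n, final heap)
def loopB (size n : Int) (h : LHeap) : Int × LHeap :=
  if n > size then
    match h with
    | .node a _ l r =>
      match meld l r with
      | .node b _ l2 r2 => loopB size (n-1) (meld (meld l2 r2) (.node (a*b) 1 .nil .nil))
      | .nil => (n, .nil)   -- Python raises here; unreachable under Pre_
    | .nil => (n, .nil)     -- Python raises here; unreachable under Pre_
  else (n, h)
termination_by (n - size).toNat
decreasing_by omega

-- the while n > 0 drain loop
def popAll (n : Int) (h : LHeap) : List Int :=
  if n > 0 then
    match h with
    | .node k _ l r => k :: popAll (n-1) (meld l r)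
    | .nil => []    -- Python raises here; unreachable (n is the heap's size)
  else []
termination_by n.toNat
decreasing_by omega

def merge_ints_alt (values : List Int) (size : Int) : List Int :=
  if values.length ≤ 1 then values
  else
    let h0 := values.foldl (fun h v => meld h (.node v 1 .nil .nil)) .nil
    let p := loopB size (values.length : Int) h0
    popAll p.1 p.2

-- ===== PRECONDITION & SPEC =====
-- Pre_ excludes exactly the inputs where A raises ValueError (unpacking a
-- 1-element list): at least 2 values together with size ≤ 0.
def Pre_merge_ints (values : List Int) (size : Int) : Prop :=
  values.length ≤ 1 ∨ 1 ≤ size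
instance (values : List Int) (size : Int) : Decidable (Pre_merge_ints values size) := by
  unfold Pre_merge_ints; infer_instance
def pvWitness_merge_ints : List Int × Int := ([5, 3, 2, 8], 2)

def Spec_merge_ints (values : List Int) (size : Int) (out : List Int) : Prop := out = merge_ints_alt values size
instance (values : List Int) (size : Int) (out : List Int) : Decidable (Spec_merge_ints values size out) := by unfold Spec_merge_ints; infer_instance

-- ===== CLAIM (what is proved, stated in full; the proofs are below) =====
def Claim_equal_merge_ints : Prop := ∀ (values : List Int) (size : Int), Dom_merge_ints values size → Pre_merge_ints values size → Spec_merge_ints values size (merge_ints values size)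

-- ===== LEMMAS AND PROOFS =====

def toMS : LHeap → Multiset Int
  | .nil => 0
  | .node k _ l r => k ::ₘ (toMS l + toMS r)

def IsHeap : LHeap → Prop
  | .nil => True
  | .node k _ l r => (∀ x ∈ toMS l + toMS r, k ≤ x) ∧ IsHeap l ∧ IsHeap r

theorem isHeap_node (k s : Int) (l r : LHeap) (h1 : ∀ x ∈ toMS l + toMS r, k ≤ x)
    (h2 : IsHeap l) (h3 : IsHeap r) : IsHeap (.node k s l r) := by
  simp only [IsHeap]; exact ⟨h1, h2, h3⟩

theorem toMS_mkNode (k : Int) (l m : LHeap) : toMS (mkNode k l m) = k ::ₘ (toMS l + toMS m) := by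
  unfold mkNode; split <;> simp [toMS, add_comm]

theorem isHeap_mkNode (k : Int) (l m : LHeap) (hl : IsHeap l) (hm : IsHeap m)
    (hle : ∀ x ∈ toMS l + toMS m, k ≤ x) : IsHeap (mkNode k l m) := by
  unfold mkNode; split <;>
    exact isHeap_node _ _ _ _ (by intro x hx; exact hle x (by simpa [add_comm] using hx)) (by tauto) (by tauto)

theorem toMS_meld (a b : LHeap) : toMS (meld a b) = toMS a + toMS b := by
  fun_induction meld a b with
  | case1 h2 => simp [toMS]
  | case2 k s l r => simp [toMS]
  | case3 k1 s1 l1 r1 k2 s2 l2 r2 hlt ih =>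
      simp only [toMS_mkNode, ih, toMS]
      simp only [← Multiset.singleton_add]; abel
  | case4 k1 s1 l1 r1 k2 s2 l2 r2 hlt ih =>
      simp only [toMS_mkNode, ih, toMS]
      simp only [← Multiset.singleton_add]; abel

theorem node_le (k s : Int) (l r : LHeap) (h : IsHeap (.node k s l r)) :
    ∀ x ∈ toMS (.node k s l r), k ≤ x := by
  intro x hx
  simp only [toMS, Multiset.mem_cons] at hx
  rcases hx with rfl | hx
  · exact le_refl x
  · exact h.1 x hx

theorem isHeap_meld (a b : LHeap) (ha : IsHeap a) (hb : IsHeap b) : IsHeap (meld a b) := by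
  fun_induction meld a b with
  | case1 h2 => exact hb
  | case2 k s l r => exact ha
  | case3 k1 s1 l1 r1 k2 s2 l2 r2 hlt ih =>
      refine isHeap_mkNode _ _ _ hb.2.1 (ih hb.2.2 ha) ?_
      intro x hx
      rw [Multiset.mem_add, toMS_meld, Multiset.mem_add] at hx
      rcases hx with hx | hx | hx
      · exact hb.1 x (Multiset.mem_add.mpr (Or.inl hx))
      · exact hb.1 x (Multiset.mem_add.mpr (Or.inr hx))
      · exact le_trans (le_of_lt hlt) (node_le k1 s1 l1 r1 ha x hx)
  | case4 k1 s1 l1 r1 k2 s2 l2 r2 hlt ih =>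
      refine isHeap_mkNode _ _ _ ha.2.1 (ih ha.2.2 hb) ?_
      intro x hx
      rw [Multiset.mem_add, toMS_meld, Multiset.mem_add] at hx
      rcases hx with hx | hx | hx
      · exact ha.1 x (Multiset.mem_add.mpr (Or.inl hx))
      · exact ha.1 x (Multiset.mem_add.mpr (Or.inr hx))
      · exact le_trans (not_lt.mp hlt) (node_le k2 s2 l2 r2 hb x hx)

theorem insortA_ms (x : Int) (l : List Int) : (↑(insortA x l) : Multiset Int) = x ::ₘ ↑l := by
  induction l with
  | nil => simp [insortA]
  | cons h t ih =>
      simp only [insortA]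
      split
      · rw [← Multiset.cons_coe, ih, Multiset.cons_swap, Multiset.cons_coe]
      · rfl

theorem mem_insortA (y x : Int) (l : List Int) : y ∈ insortA x l ↔ y = x ∨ y ∈ l := by
  have := insortA_ms x l
  constructor
  · intro h
    have : y ∈ (↑(insortA x l) : Multiset Int) := by simpa using h
    rw [insortA_ms] at this; simpa using this
  · intro h
    have : y ∈ (x ::ₘ (↑l : Multiset Int)) := by simpa using h
    rw [← insortA_ms] at this; simpa using this

theorem insortA_pairwise (x : Int) (l : List Int) (h : l.Pairwise (· ≤ ·)) :
    (insortA x l).Pairwise (· ≤ ·) := by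
  induction l with
  | nil => simp [insortA]
  | cons a t ih =>
      rw [List.pairwise_cons] at h
      simp only [insortA]
      split
      · rw [List.pairwise_cons]
        refine ⟨?_, ih h.2⟩
        intro y hy
        rcases (mem_insortA y x t).mp hy with rfl | hy
        · omega
        · exact h.1 y hy
      · rw [List.pairwise_cons]
        refine ⟨?_, List.pairwise_cons.mpr h⟩
        intro y hy
        rcases hy with _ | hy
        · omega
        · have := h.1 y (by assumption); omega

theorem loopA_pairwise (size : Int) (l : List Int) :
    l.Pairwise (· ≤ ·) → (loopA size l).Pairwise (· ≤ ·) := by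
  fun_induction loopA size l
  case case2 => exact id
  case case3 => exact id
  case case1 a b rest hgt ih =>
    intro h
    rw [List.pairwise_cons] at h
    rw [List.pairwise_cons] at h
    exact ih (insortA_pairwise (a*b) rest h.2.2)

theorem build_spec (xs : List Int) : ∀ h0 : LHeap, IsHeap h0 →
    IsHeap (xs.foldl (fun h v => meld h (.node v 1 .nil .nil)) h0) ∧
    toMS (xs.foldl (fun h v => meld h (.node v 1 .nil .nil)) h0) = toMS h0 + ↑xs := by
  induction xs with
  | nil => intro h0 hh; exact ⟨hh, by simp⟩
  | cons x t ih =>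
      intro h0 hh
      simp only [List.foldl_cons]
      have hsing : IsHeap (LHeap.node x 1 .nil .nil) :=
        isHeap_node _ _ _ _ (by simp [toMS]) trivial trivial
      obtain ⟨h1, h2⟩ := ih _ (isHeap_meld _ _ hh hsing)
      refine ⟨h1, ?_⟩
      rw [h2, toMS_meld]
      show toMS h0 + (x ::ₘ (toMS .nil + toMS .nil)) + ↑t = toMS h0 + ↑(x :: t)
      rw [← Multiset.cons_coe]
      simp only [toMS, ← Multiset.singleton_add]
      abel

theorem loopB_sim (size : Int) (hsize : 1 ≤ size) :
    ∀ m (s : List Int) (h : LHeap), s.length = m → s.Pairwise (· ≤ ·) → IsHeap h → toMS h = ↑s →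
    IsHeap (loopB size (s.length : Int) h).2 ∧
    toMS (loopB size (s.length : Int) h).2 = ↑(loopA size s) ∧
    (loopB size (s.length : Int) h).1 = ((loopA size s).length : Int) := by
  intro m
  induction m using Nat.strong_induction_on with
  | _ m ih =>
  intro s h hm hpw hheap hms
  by_cases hgt : (s.length : Int) > size
  case neg =>
    rw [loopB.eq_def, if_neg hgt, loopA.eq_def, if_neg hgt]
    exact ⟨hheap, hms, rfl⟩
  case pos =>
    obtain ⟨a, b, rest, rfl⟩ : ∃ a b rest, s = a :: b :: rest := by
      match s with
      | [] => simp at hgt; omega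
      | [x] => simp at hgt; omega
      | a :: b :: rest => exact ⟨a, b, rest, rfl⟩
    match h with
    | .nil =>
      exfalso
      have hmem : a ∈ (↑(a :: b :: rest) : Multiset Int) := by simp
      rw [← hms] at hmem
      simp [toMS] at hmem
    | .node a0 s0 l r =>
      -- the root of the heap is the head of the sorted list
      have ha0 : a0 = a := by
        have h1 : a0 ∈ toMS (LHeap.node a0 s0 l r) := by simp [toMS]
        rw [hms] at h1
        have h1' : a0 = a ∨ a0 ∈ b :: rest := by
          have := Multiset.mem_coe.mp h1
          rw [List.mem_cons] at this
          exact this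
        have h2 : a ∈ toMS (LHeap.node a0 s0 l r) := by
          rw [hms]; simp
        have h3 := node_le a0 s0 l r hheap a h2
        have h4 : a ≤ a0 := by
          rcases h1' with rfl | h1' ; · rfl
          exact (List.pairwise_cons.mp hpw).1 a0 h1'
        omega
      subst a0
      have hrest : toMS l + toMS r = ↑(b :: rest) := by
        have : a ::ₘ (toMS l + toMS r) = a ::ₘ ↑(b :: rest) := by
          rw [show a ::ₘ (↑(b :: rest) : Multiset Int) = ↑(a :: b :: rest) from (Multiset.cons_coe a _)]
          exact hms
        exact (Multiset.cons_inj_right a).mp this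
      have hml : toMS (meld l r) = ↑(b :: rest) := by rw [toMS_meld, hrest]
      have hheapml : IsHeap (meld l r) := isHeap_meld l r hheap.2.1 hheap.2.2
      have hpwtail : (b :: rest).Pairwise (· ≤ ·) := (List.pairwise_cons.mp hpw).2
      match hmeld : meld l r with
      | .nil =>
        exfalso
        rw [hmeld] at hml
        have hmem : b ∈ (toMS LHeap.nil) := by rw [hml]; simp
        simp [toMS] at hmem
      | .node b0 s1 l2 r2 =>
        rw [hmeld] at hml hheapml
        have hb0 : b0 = b := by
          have h1 : b0 ∈ toMS (LHeap.node b0 s1 l2 r2) := by simp [toMS]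
          rw [hml] at h1
          have h1' : b0 = b ∨ b0 ∈ rest := by
            have := Multiset.mem_coe.mp h1
            rw [List.mem_cons] at this
            exact this
          have h2 : b ∈ toMS (LHeap.node b0 s1 l2 r2) := by rw [hml]; simp
          have h3 := node_le b0 s1 l2 r2 hheapml b h2
          have h4 : b ≤ b0 := by
            rcases h1' with rfl | h1' ; · rfl
            exact (List.pairwise_cons.mp hpwtail).1 b0 h1'
          omega
        subst b0
        have hrest2 : toMS l2 + toMS r2 = ↑rest := by
          have : b ::ₘ (toMS l2 + toMS r2) = b ::ₘ ↑rest := by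
            rw [show b ::ₘ (↑rest : Multiset Int) = ↑(b :: rest) from (Multiset.cons_coe b _)]
            exact hml
          exact (Multiset.cons_inj_right b).mp this
        have hsing : IsHeap (LHeap.node (a*b) 1 .nil .nil) :=
          isHeap_node _ _ _ _ (by simp [toMS]) trivial trivial
        have hheap2 : IsHeap (meld (meld l2 r2) (.node (a*b) 1 .nil .nil)) :=
          isHeap_meld _ _ (isHeap_meld l2 r2 hheapml.2.1 hheapml.2.2) hsing
        have hms2 : toMS (meld (meld l2 r2) (.node (a*b) 1 .nil .nil)) = ↑(insortA (a*b) rest) := by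
          rw [toMS_meld, toMS_meld, hrest2, insortA_ms]
          show (↑rest : Multiset Int) + ((a*b) ::ₘ (toMS .nil + toMS .nil)) = (a*b) ::ₘ ↑rest
          simp only [toMS, ← Multiset.singleton_add]
          abel
        have hlen : ((a :: b :: rest).length : Int) - 1 = ((insortA (a*b) rest).length : Int) := by
          simp [length_insortA]
        have hm' : (insortA (a*b) rest).length < m := by
          rw [length_insortA]; simp at hm; omega
        have hpw' : (insortA (a*b) rest).Pairwise (· ≤ ·) :=
          insortA_pairwise _ _ (List.pairwise_cons.mp hpwtail).2
        have := ih _ hm' (insortA (a*b) rest) _ rfl hpw' hheap2 hms2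
        have hstepB : loopB size (((a :: b :: rest).length : Int)) (LHeap.node a s0 l r)
            = loopB size (((a :: b :: rest).length : Int) - 1)
                (meld (meld l2 r2) (.node (a*b) 1 .nil .nil)) := by
          rw [loopB.eq_def]
          simp only [if_pos hgt, hmeld]
        have hstepA : loopA size (a :: b :: rest) = loopA size (insortA (a*b) rest) := by
          rw [loopA.eq_def]
          simp only [if_pos hgt]
        rw [hstepB, hstepA, hlen]
        exact this

theorem popAll_spec : ∀ m (h : LHeap) (n : Int), Multiset.card (toMS h) = m → IsHeap h →
    n = (m : Int) → (popAll n h).Pairwise (· ≤ ·) ∧ (↑(popAll n h) : Multiset Int) = toMS h := by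
  intro m
  induction m using Nat.strong_induction_on with
  | _ m ih =>
  intro h n hcard hheap hn
  match h with
  | .nil =>
      have : m = 0 := by simpa [toMS] using hcard.symm
      rw [popAll.eq_def, if_neg (by omega)]
      simp [toMS]
  | .node k s l r =>
      have hmpos : 0 < m := by
        rw [← hcard]; simp [toMS]
      rw [popAll.eq_def, if_pos (by omega)]
      have hcard' : Multiset.card (toMS (meld l r)) = m - 1 := by
        rw [toMS_meld]
        have : Multiset.card (toMS (LHeap.node k s l r)) = Multiset.card (toMS l + toMS r) + 1 := by
          simp [toMS]
        omega
      obtain ⟨hpw, hms⟩ := ih (m - 1) (by omega) (meld l r) (n - 1) hcard'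
        (isHeap_meld l r hheap.2.1 hheap.2.2) (by omega)
      constructor
      · rw [List.pairwise_cons]
        refine ⟨?_, hpw⟩
        intro y hy
        have : y ∈ (↑(popAll (n-1) (meld l r)) : Multiset Int) := by simpa using hy
        rw [hms, toMS_meld] at this
        exact hheap.1 y this
      · rw [← Multiset.cons_coe, hms, toMS_meld]
        rfl

-- ===== VERDICT (by name: the statement is the Claim_ definition above) =====
theorem merge_ints_spec : Claim_equal_merge_ints := by
  intro values size hdom hpre
  unfold Spec_merge_ints merge_ints merge_ints_alt
  by_cases hle : values.length ≤ 1
  · simp [hle]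
  · simp only [if_neg hle]
    have hsize : 1 ≤ size := by
      rcases hpre with h | h
      · exact absurd h hle
      · exact h
    have hpw : (PySem.List.sorted values (fun x => x)).Pairwise (· ≤ ·) :=
      PySem.List.sorted_pairwise values (fun x => x)
    have hperm : (PySem.List.sorted values (fun x => x)).Perm values :=
      PySem.List.sorted_perm values (fun x => x) false
    obtain ⟨hbh, hbms⟩ := build_spec values .nil trivial
    have hbms' : toMS (values.foldl (fun h v => meld h (.node v 1 .nil .nil)) .nil) =
        ↑(PySem.List.sorted values (fun x => x)) := by
      rw [hbms]
      show (0 : Multiset Int) + ↑values = _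
      rw [zero_add]
      exact (Multiset.coe_eq_coe.mpr hperm).symm
    have hlen : (values.length : Int) = ((PySem.List.sorted values (fun x => x)).length : Int) := by
      rw [PySem.List.length_sorted]
    obtain ⟨hfh, hfms, hfn⟩ := loopB_sim size hsize (PySem.List.sorted values (fun x => x)).length
      (PySem.List.sorted values (fun x => x))
      (values.foldl (fun h v => meld h (.node v 1 .nil .nil)) .nil) rfl hpw hbh hbms'
    rw [hlen]
    obtain ⟨hppw, hpms⟩ := popAll_spec (loopA size (PySem.List.sorted values (fun x => x))).length
      (loopB size ((PySem.List.sorted values (fun x => x)).length : Int)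
        (values.foldl (fun h v => meld h (.node v 1 .nil .nil)) .nil)).2
      (loopB size ((PySem.List.sorted values (fun x => x)).length : Int)
        (values.foldl (fun h v => meld h (.node v 1 .nil .nil)) .nil)).1
      (by rw [hfms]; simp) hfh (by rw [hfn])
    have hperm2 : (loopA size (PySem.List.sorted values (fun x => x))).Perm
        (popAll (loopB size ((PySem.List.sorted values (fun x => x)).length : Int)
          (values.foldl (fun h v => meld h (.node v 1 .nil .nil)) .nil)).1
         (loopB size ((PySem.List.sorted values (fun x => x)).length : Int)
          (values.foldl (fun h v => meld h (.node v 1 .nil .nil)) .nil)).2) := by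
      apply Multiset.coe_eq_coe.mp
      rw [hpms, hfms]
    exact List.eq_of_perm_of_sorted (fun a b _ _ h1 h2 => le_antisymm h1 h2)
      (loopA_pairwise size _ hpw) hppw hperm2
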